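-- pv_equiv track=rewrite | github.com/mi-ra-sh/PushToTalk | whisper_engine.py | has_repeated_phrase
-- ===== SOURCE A (Python) =====
-- def has_repeated_phrase(text, min_phrase_len=2, max_phrase_len=6, max_repeats=2):
--     """Check if text contains a repeated phrase of any length.
--
--     Looks for phrases of min..max words repeated max_repeats+ times consecutively.
--     Returns the first found phrase or None.
--     """
--     words = text.lower().split()
--     for phrase_len in range(min_phrase_len, min(max_phrase_len + 1, len(words) // max_repeats + 1)):
--         for start in range(len(words) - phrase_len * max_repeats + 1):
--             phrase = tuple(words[start : start + phrase_len])
--             count = 1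
--             pos = start + phrase_len
--             while pos + phrase_len <= len(words):
--                 if tuple(words[pos : pos + phrase_len]) == phrase:
--                     count += 1
--                     pos += phrase_len
--                 else:
--                     break
--             if count >= max_repeats:
--                 return " ".join(phrase)
--     return None
-- ===== SOURCE B (Python) =====
-- def has_repeated_phrase(text, min_phrase_len=2, max_phrase_len=6, max_repeats=2):
--     """Check if text contains a repeated phrase of any length.
--
--     Same result as the original, but per phrase length it builds a table of
--     word-vs-word-at-offset-L equalities once and finds the first long-enough
--     run of equalities, instead of re-scanning blocks from every start.
--     """
--     words = text.lower().split()
--     n = len(words)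
--     for L in range(min_phrase_len, min(max_phrase_len + 1, n // max_repeats + 1)):
--         need = (max_repeats - 1) * L
--         if need <= 0:
--             if L * max_repeats <= n:
--                 return " ".join(words[:L])
--             continue
--         eqs = [a == b for a, b in zip(words, words[L:])]
--         run = 0
--         for i, e in enumerate(eqs):
--             if e:
--                 run += 1
--                 if run == need:
--                     s = i + 1 - need
--                     return " ".join(words[s : s + L])
--             else:
--                 run = 0
--     return None
-- ===== Notes on version B (the rewrite author's own statement) =====
-- stated objective: alternative
-- what changed: Instead of re-extracting and re-comparing word blocks from every start position, B builds, per phrase length L, one table of word-vs-word-at-offset-L equalities and finds the first run of (max_repeats-1)*L consecutive equalities in a single left-to-right scan.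
-- outside the precondition, e.g. on has_repeated_phrase('a b', -1, 6, 2): A returns '', B returns 'a'; on has_repeated_phrase('a b a b', -2, 6, 2): A returns '', B returns 'a b'
import Mathlib
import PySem

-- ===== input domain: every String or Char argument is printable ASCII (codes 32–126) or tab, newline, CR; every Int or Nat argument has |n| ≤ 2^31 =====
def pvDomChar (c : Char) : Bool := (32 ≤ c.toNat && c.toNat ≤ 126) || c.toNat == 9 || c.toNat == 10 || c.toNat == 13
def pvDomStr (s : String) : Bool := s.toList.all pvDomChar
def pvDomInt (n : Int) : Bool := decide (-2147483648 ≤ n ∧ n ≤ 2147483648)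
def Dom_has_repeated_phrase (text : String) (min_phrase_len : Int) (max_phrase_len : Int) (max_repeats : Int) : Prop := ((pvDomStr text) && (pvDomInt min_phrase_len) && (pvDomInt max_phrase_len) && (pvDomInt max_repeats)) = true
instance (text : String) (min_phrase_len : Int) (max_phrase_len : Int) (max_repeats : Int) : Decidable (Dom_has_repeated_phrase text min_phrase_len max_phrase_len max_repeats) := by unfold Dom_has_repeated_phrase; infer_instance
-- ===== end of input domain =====

-- B replaces A's per-start block re-scan by a per-length table of word-vs-word-at-offset equalities
-- plus a single run-length scan (objective: alternative; avoids quadratic per-length worst cases, not measurably faster on a timing run's inputs). Pre_ below excludes the inputs where A raises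
-- or diverges (max_repeats = 0; a reachable phrase length ≤ 0) — see the comment at Pre_.

-- ===== PORT A =====
-- the 'while pos + phrase_len <= len(words)' loop; fuel (words.length + 1) is enough for any
-- phrase_len ≥ 1 (the only lengths Pre_ lets the outer range reach)
def pvCountLoopA (words phrase : List String) (L : Int) : Nat → Int → Int → Int
  | 0, _, count => count
  | f + 1, pos, count =>
    if pos + L ≤ (words.length : Int) then
      if PySem.List.slice words (some pos) (some (pos + L)) = phrase then
        pvCountLoopA words phrase L f (pos + L) (count + 1)
      else count
    else count

-- 'for start in range(...)': first start whose count reaches max_repeats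
def pvStartLoopA (words : List String) (L mr : Int) : List Int → Option String
  | [] => none
  | s :: rest =>
    let phrase := PySem.List.slice words (some s) (some (s + L))
    let count := pvCountLoopA words phrase L (words.length + 1) (s + L) 1
    if mr ≤ count then some (PySem.Str.join " " phrase)
    else pvStartLoopA words L mr rest

-- 'for phrase_len in range(...)'
def pvPhraseLoopA (words : List String) (mr : Int) : List Int → Option String
  | [] => none
  | L :: rest =>
    match pvStartLoopA words L mr (PySem.List.pyRange 0 ((words.length : Int) - L * mr + 1) 1) with
    | some r => some r
    | none => pvPhraseLoopA words mr rest

def has_repeated_phrase (text : String) (min_phrase_len : Int) (max_phrase_len : Int) (max_repeats : Int) : Option String :=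
  let words := PySem.Str.split₀ (PySem.Str.lower text)
  pvPhraseLoopA words max_repeats
    (PySem.List.pyRange min_phrase_len
      (min (max_phrase_len + 1) (PySem.Int.floordiv (words.length : Int) max_repeats + 1)) 1)

-- ===== PORT B =====
-- 'for i, e in enumerate(eqs)': run-length scan of the equality table
def pvRunLoopB (words : List String) (L need : Int) : List Bool → Int → Int → Option String
  | [], _, _ => none
  | e :: rest, i, run =>
    if e then
      if run + 1 = need then
        some (PySem.Str.join " " (PySem.List.slice words (some (i + 1 - need)) (some (i + 1 - need + L))))
      else pvRunLoopB words L need rest (i + 1) (run + 1)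
    else pvRunLoopB words L need rest (i + 1) 0

def pvPhraseLoopB (words : List String) (mr : Int) : List Int → Option String
  | [] => none
  | L :: rest =>
    let need := (mr - 1) * L
    if need ≤ 0 then
      if L * mr ≤ (words.length : Int) then
        some (PySem.Str.join " " (PySem.List.slice words none (some L)))
      else pvPhraseLoopB words mr rest
    else
      match pvRunLoopB words L need
          ((words.zip (PySem.List.slice words (some L) none)).map (fun p => p.1 == p.2)) 0 0 with
      | some r => some r
      | none => pvPhraseLoopB words mr rest

def has_repeated_phrase_alt (text : String) (min_phrase_len : Int) (max_phrase_len : Int) (max_repeats : Int) : Option String :=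
  let words := PySem.Str.split₀ (PySem.Str.lower text)
  pvPhraseLoopB words max_repeats
    (PySem.List.pyRange min_phrase_len
      (min (max_phrase_len + 1) (PySem.Int.floordiv (words.length : Int) max_repeats + 1)) 1)

-- ===== PRECONDITION & SPEC =====
-- Pre_ excludes max_repeats = 0 (A raises ZeroDivisionError) and the inputs where the outer range
-- reaches a phrase length ≤ 0 (possible only when min_phrase_len < 1 and the range is non-empty):
-- there A either diverges (pos stops advancing) or returns an accidental value produced by
-- negative-length/negative-index slices.
def Pre_has_repeated_phrase (text : String) (min_phrase_len : Int) (max_phrase_len : Int) (max_repeats : Int) : Prop :=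
  max_repeats ≠ 0 ∧
    (1 ≤ min_phrase_len ∨
      min (max_phrase_len + 1)
          (PySem.Int.floordiv ((PySem.Str.split₀ (PySem.Str.lower text)).length : Int) max_repeats + 1)
        ≤ min_phrase_len)
instance (text : String) (min_phrase_len : Int) (max_phrase_len : Int) (max_repeats : Int) : Decidable (Pre_has_repeated_phrase text min_phrase_len max_phrase_len max_repeats) := by unfold Pre_has_repeated_phrase; infer_instance

def pvWitness_has_repeated_phrase : String × Int × Int × Int := ("the cat The Cat sat", 2, 6, 2)

def Spec_has_repeated_phrase (text : String) (min_phrase_len : Int) (max_phrase_len : Int) (max_repeats : Int) (out : Option String) : Prop := out = has_repeated_phrase_alt text min_phrase_len max_phrase_len max_repeats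
instance (text : String) (min_phrase_len : Int) (max_phrase_len : Int) (max_repeats : Int) (out : Option String) : Decidable (Spec_has_repeated_phrase text min_phrase_len max_phrase_len max_repeats out) := by unfold Spec_has_repeated_phrase; infer_instance

-- ===== CLAIM (what is proved, stated in full; the proofs are below) =====
def Claim_equal_has_repeated_phrase : Prop := ∀ (text : String) (min_phrase_len : Int) (max_phrase_len : Int) (max_repeats : Int), Dom_has_repeated_phrase text min_phrase_len max_phrase_len max_repeats → Pre_has_repeated_phrase text min_phrase_len max_phrase_len max_repeats → Spec_has_repeated_phrase text min_phrase_len max_phrase_len max_repeats (has_repeated_phrase text min_phrase_len max_phrase_len max_repeats)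

-- ===== LEMMAS AND PROOFS =====

-- word at index (proof-side shorthand)
def pvW (words : List String) (i : Nat) : String := words.getD i ""

-- the per-start success predicate both loop analyses are reduced to:
-- the phrase of length l starting at s is followed by nd = (m-1)*l offset-l equalities
def pvGood (words : List String) (l nd s : Nat) : Bool :=
  decide (∀ j < nd, pvW words (s + j) = pvW words (s + j + l))
theorem pvCountLoopA_le (words phrase : List String) (L : Int) (f : Nat) (pos count : Int) :
    count ≤ pvCountLoopA words phrase L f pos count := by
  induction f generalizing pos count with
  | zero => simp [pvCountLoopA]
  | succ f ih =>
    simp only [pvCountLoopA]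
    split
    · split
      · exact le_trans (by omega) (ih (pos + L) (count + 1))
      · exact le_refl _
    · exact le_refl _

theorem pvCountLoopA_char (words phrase : List String) (L : Int) (t : Nat) :
    ∀ (f : Nat) (pos count : Int), t ≤ f →
      ((count + t ≤ pvCountLoopA words phrase L f pos count) ↔
        (∀ k < t, pos + k * L + L ≤ (words.length : Int) ∧
          PySem.List.slice words (some (pos + k * L)) (some (pos + k * L + L)) = phrase)) := by
  induction t with
  | zero =>
    intro f pos count _
    constructor
    · intro _ k hk; omega
    · intro _; simpa using pvCountLoopA_le words phrase L f pos count
  | succ t ih =>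
    intro f pos count hf
    obtain ⟨f', rfl⟩ : ∃ f', f = f' + 1 := ⟨f - 1, by omega⟩
    simp only [pvCountLoopA]
    by_cases h1 : pos + L ≤ (words.length : Int)
    · rw [if_pos h1]
      by_cases h2 : PySem.List.slice words (some pos) (some (pos + L)) = phrase
      · rw [if_pos h2]
        have := ih f' (pos + L) (count + 1) (by omega)
        constructor
        · intro hle k hk
          rcases Nat.eq_zero_or_pos k with rfl | hkpos
          · simpa using ⟨h1, h2⟩
          · obtain ⟨k', rfl⟩ : ∃ k', k = k' + 1 := ⟨k - 1, by omega⟩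
            have hk' : k' < t := by omega
            have := (this.mp (by omega)) k' hk'
            constructor
            · have := this.1; push_cast; push_cast at this; linarith
            · have h := this.2
              have : pos + L + (k' : Int) * L = pos + ((k' : Int) + 1) * L := by ring
              rw [this] at h
              convert h using 4
        · intro hall
          have hrec : count + 1 + t ≤ pvCountLoopA words phrase L f' (pos + L) (count + 1) := by
            apply this.mpr
            intro k hk
            have h := hall (k + 1) (by omega)
            constructor
            · have := h.1; push_cast at this ⊢; linarith
            · have h2 := h.2
              have he : pos + ((k : Int) + 1) * L = pos + L + (k : Int) * L := by ring
              push_cast at h2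
              rw [he] at h2
              convert h2 using 4
          omega
      · rw [if_neg h2]
        constructor
        · intro h; omega
        · intro hall
          exfalso
          have := (hall 0 (by omega)).2
          simp at this
          exact h2 this
    · rw [if_neg h1]
      constructor
      · intro h; omega
      · intro hall
        exfalso
        have := (hall 0 (by omega)).1
        simp at this
        omega

theorem pvBlock_eq_iff (words : List String) (l p q : Nat)
    (hp : p + l ≤ words.length) (hq : q + l ≤ words.length) :
    ((words.drop p).take l = (words.drop q).take l) ↔ ∀ r < l, pvW words (p + r) = pvW words (q + r) := by
  have hlp : ((words.drop p).take l).length = l := by simp; omega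
  have hlq : ((words.drop q).take l).length = l := by simp; omega
  constructor
  · intro h r hr
    have := congrArg (fun xs => xs.getD r "") h
    simp only [List.getD_eq_getElem?_getD, List.getElem?_take, List.getElem?_drop] at this
    simpa [pvW, List.getD_eq_getElem?_getD, hr] using this
  · intro h
    apply List.ext_getElem (by omega)
    intro i h1 h2
    have hi : i < l := by omega
    have hh := h i hi
    simp only [pvW, List.getD_eq_getElem?_getD] at hh
    simp only [List.getElem_take, List.getElem_drop]
    rw [List.getElem?_eq_getElem (by omega : p + i < words.length),
        List.getElem?_eq_getElem (by omega : q + i < words.length)] at hh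
    simpa using hh

theorem pvChain (words : List String) (l m s : Nat) (hl : 1 ≤ l) :
    ((∀ k < m - 1, ∀ r < l, pvW words (s + (k + 1) * l + r) = pvW words (s + r)) ↔
      (∀ j < (m - 1) * l, pvW words (s + j) = pvW words (s + j + l))) := by
  constructor
  · intro h j hj
    have hr : j % l < l := Nat.mod_lt _ (by omega)
    have hk : j / l < m - 1 := Nat.div_lt_of_lt_mul (by rw [mul_comm]; exact hj)
    have hdm := Nat.div_add_mod j l
    set k := j / l with hkdef
    set r := j % l with hrdef
    have h2 := h k hk r hr
    have hdm' : k * l + r = j := by rw [mul_comm]; exact hdm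
    have e2 : s + (k + 1) * l + r = s + j + l := by
      have : (k + 1) * l = k * l + l := by ring
      omega
    rw [e2] at h2
    rw [h2]
    rcases Nat.eq_zero_or_pos k with hk0 | hkpos
    · rw [hk0] at hdm'
      simp at hdm'
      congr 1
      omega
    · have h1 := h (k - 1) (by omega) r hr
      have e1 : s + (k - 1 + 1) * l + r = s + j := by
        have t1 : (k - 1 + 1) * l = (k - 1) * l + l := by ring
        have t2 : k * l = (k - 1) * l + l := by
          nth_rewrite 1 [show k = (k - 1) + 1 by omega]; ring
        omega
      rw [e1] at h1
      exact h1
  · intro h k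
    induction k with
    | zero =>
      intro hk0 r hr
      have hml : l ≤ (m - 1) * l := by
        calc l = 1 * l := (one_mul l).symm
        _ ≤ (m - 1) * l := Nat.mul_le_mul_right l (by omega)
      have h1 := h r (by omega)
      have e : s + (0 + 1) * l + r = s + r + l := by ring
      rw [e]
      exact h1.symm
    | succ k ih =>
      intro hk r hr
      have hih := ih (by omega) r hr
      have hj : (k + 1) * l + r < (m - 1) * l := by
        have h1 : (k + 1) * l + r < (k + 2) * l := by
          have : (k + 2) * l = (k + 1) * l + l := by ring
          omega
        have h2 : (k + 2) * l ≤ (m - 1) * l := Nat.mul_le_mul_right _ (by omega)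
        omega
      have h1 := h ((k + 1) * l + r) hj
      have e : s + ((k + 1) * l + r) + l = s + (k + 1 + 1) * l + r := by
        have : (k + 1 + 1) * l = (k + 1) * l + l := by ring
        omega
      rw [e] at h1
      have e2 : s + ((k + 1) * l + r) = s + (k + 1) * l + r := by omega
      rw [e2] at h1
      rw [← h1]
      exact hih

theorem pvCount_iff_good (words : List String) (l m s : Nat) (hl : 1 ≤ l) (hm : 2 ≤ m)
    (hs : s + m * l ≤ words.length) :
    (((m : Nat) : Int) ≤ pvCountLoopA words ((words.drop s).take l) (l : Int) (words.length + 1)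
        ((s : Int) + (l : Int)) 1) ↔ pvGood words l ((m - 1) * l) s = true := by
  have hml : m ≤ words.length := by
    have := Nat.mul_le_mul_left m hl
    omega
  have hchar := pvCountLoopA_char words ((words.drop s).take l) (l : Int) (m - 1)
      (words.length + 1) ((s : Int) + (l : Int)) 1 (by omega)
  have hcast : (1 : Int) + ((m - 1 : Nat) : Int) = (m : Int) := by push_cast; omega
  rw [show ((m : Nat) : Int) = 1 + ((m - 1 : Nat) : Int) by omega] at *
  rw [hchar]
  -- now: (∀ k < m-1, bound ∧ slice = phrase) ↔ pvGood
  have hsl : s + l ≤ words.length := by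
    have := Nat.mul_le_mul_right l (show 1 ≤ m by omega)
    omega
  have hb1 : ∀ k, k < m - 1 → s + (k + 1) * l + l ≤ words.length := by
    intro k hk
    have h1 : (k + 2) * l ≤ m * l := Nat.mul_le_mul_right l (by omega)
    have h2 : (k + 1) * l + l = (k + 2) * l := by ring
    omega
  constructor
  · intro hall
    rw [pvGood, decide_eq_true_iff]
    rw [← pvChain words l m s hl]
    intro k hk r hr
    have h := (hall k hk).2
    have e : (s : Int) + (l : Int) + (k : Int) * (l : Int) =
        ((s + (k + 1) * l : Nat) : Int) := by push_cast; ring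
    rw [e, show ((s + (k + 1) * l : Nat) : Int) + (l : Int) = ((s + (k + 1) * l : Nat) : Int) + ((l : Nat) : Int) by push_cast; ring,
        PySem.List.slice_natCast_add] at h
    have hb := (pvBlock_eq_iff words l (s + (k + 1) * l) s (by have := hb1 k hk; omega) (by omega)).mp h
    exact hb r hr
  · intro hg k hk
    rw [pvGood, decide_eq_true_iff] at hg
    have hc := (pvChain words l m s hl).mpr hg k hk
    constructor
    · have := (Nat.cast_le (α := Int)).mpr (hb1 k hk)
      push_cast at this ⊢
      linarith
    · have e : (s : Int) + (l : Int) + (k : Int) * (l : Int) =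
          ((s + (k + 1) * l : Nat) : Int) := by push_cast; ring
      rw [e, show ((s + (k + 1) * l : Nat) : Int) + (l : Int) = ((s + (k + 1) * l : Nat) : Int) + ((l : Nat) : Int) by push_cast; ring,
          PySem.List.slice_natCast_add]
      exact (pvBlock_eq_iff words l (s + (k + 1) * l) s (by have := hb1 k hk; omega) (by omega)).mpr hc

theorem pvStartLoopA_eq_find (words : List String) (l m : Nat) (hl : 1 ≤ l) (hm : 2 ≤ m) :
    ∀ ss : List Nat, (∀ s ∈ ss, s + m * l ≤ words.length) →
      pvStartLoopA words (l : Int) (m : Int) (ss.map Int.ofNat) =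
        (ss.find? (pvGood words l ((m - 1) * l))).map
          (fun s => PySem.Str.join " " ((words.drop s).take l)) := by
  intro ss
  induction ss with
  | nil => intro _; rfl
  | cons s rest ih =>
    intro h
    have hs := h s (by simp)
    rw [List.map_cons]
    rw [pvStartLoopA, List.find?_cons]
    simp only [Int.ofNat_eq_natCast]
    have hph : PySem.List.slice words (some (s : Int)) (some ((s : Int) + (l : Int))) =
        (words.drop s).take l := PySem.List.slice_natCast_add words s l
    rw [hph]
    by_cases hg : pvGood words l ((m - 1) * l) s = true
    · rw [if_pos ((pvCount_iff_good words l m s hl hm hs).mpr hg), hg]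
      rfl
    · rw [if_neg (fun hc => hg ((pvCount_iff_good words l m s hl hm hs).mp hc))]
      rw [Bool.not_eq_true] at hg
      rw [hg]
      exact ih (fun s' hs' => h s' (by simp [hs']))

theorem pvEqs_eq (words : List String) (l : Nat) (hl : l ≤ words.length) :
    ((words.zip (words.drop l)).map (fun p => p.1 == p.2)) =
      (List.range (words.length - l)).map (fun i => pvW words i == pvW words (i + l)) := by
  apply List.ext_getElem (by simp)
  intro i h1 h2
  simp only [List.getElem_map, List.getElem_zip, List.getElem_drop, List.getElem_range]
  have hi : i < words.length - l := by simpa using h2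
  have e1 : pvW words i = words[i]'(by omega) := by
    simp [pvW, List.getD_eq_getElem?_getD, List.getElem?_eq_getElem (by omega : i < words.length)]
  have e2 : pvW words (i + l) = words[l + i]'(by omega) := by
    have : i + l = l + i := by omega
    rw [this]
    simp [pvW, List.getD_eq_getElem?_getD, List.getElem?_eq_getElem (by omega : l + i < words.length)]
  rw [e1, e2]

theorem pvRun_aux (words : List String) (l m : Nat) (hl : 1 ≤ l) (hm : 2 ≤ m)
    (hn : m * l ≤ words.length) :
    ∀ (c d r : Nat),
      d + c = words.length - l →
      r ≤ d → r < (m - 1) * l →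
      (d = r ∨ (pvW words (d - r - 1) == pvW words (d - r - 1 + l)) = false) →
      (∀ j, d - r ≤ j → j < d → (pvW words j == pvW words (j + l)) = true) →
      (∀ s, s + (m - 1) * l ≤ d → pvGood words l ((m - 1) * l) s = false) →
      pvRunLoopB words (l : Int) (((m - 1) * l : Nat) : Int)
          ((List.range' d c).map (fun i => pvW words i == pvW words (i + l))) (d : Int) (r : Int) =
        ((List.range (words.length - m * l + 1)).find? (pvGood words l ((m - 1) * l))).map
          (fun s => PySem.Str.join " " ((words.drop s).take l)) := by
  have hsplit : (m - 1) * l + l = m * l := by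
    nth_rewrite 2 [show m = (m - 1) + 1 by omega]; ring
  have hln : l ≤ words.length := by
    have : 1 * l ≤ m * l := Nat.mul_le_mul_right l (by omega)
    omega
  have hnd1 : 1 ≤ (m - 1) * l := by
    have := Nat.mul_le_mul (show 1 ≤ m - 1 by omega) hl
    omega
  intro c
  induction c with
  | zero =>
    intro d r hd hr hrnd hmax hstreak hnofind
    have hfind : (List.range (words.length - m * l + 1)).find?
        (pvGood words l ((m - 1) * l)) = none := by
      rw [List.find?_range_eq_none]
      intro s hs
      have := hnofind s (by omega)
      simp [this]
    rw [hfind]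
    rfl
  | succ c ih =>
    intro d r hd hr hrnd hmax hstreak hnofind
    rw [List.range'_succ, List.map_cons]
    rw [pvRunLoopB]
    by_cases he : (pvW words d == pvW words (d + l)) = true
    · rw [he, if_pos rfl]
      by_cases hfin : r + 1 = (m - 1) * l
      · have hfinI : (r : Int) + 1 = (((m - 1) * l : Nat) : Int) := by exact_mod_cast hfin
        rw [if_pos hfinI]
        have hs0 : (d : Int) + 1 - (((m - 1) * l : Nat) : Int) = ((d + 1 - (m - 1) * l : Nat) : Int) := by
          push_cast [Nat.cast_sub (show (m - 1) * l ≤ d + 1 by omega)]; ring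
        set s0 : Nat := d + 1 - (m - 1) * l with hs0def
        have hfind : (List.range (words.length - m * l + 1)).find?
            (pvGood words l ((m - 1) * l)) = some s0 := by
          rw [List.find?_range_eq_some]
          refine ⟨?_, ?_, ?_⟩
          · rw [pvGood, decide_eq_true_iff]
            intro j hj
            rcases Nat.lt_or_ge (s0 + j) d with hlt | hge
            · have := hstreak (s0 + j) (by omega) hlt
              simpa using this
            · have hje : s0 + j = d := by omega
              rw [hje]
              simpa using he
          · rw [List.mem_range]
            omega
          · intro j hj
            have := hnofind j (by omega)
            simp [this]
        rw [hfind]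
        rw [hs0]
        rw [show ((s0 : Nat) : Int) + (l : Int) = ((s0 : Nat) : Int) + ((l : Nat) : Int) from rfl,
            PySem.List.slice_natCast_add]
        rfl
      · have hfinI : ¬ ((r : Int) + 1 = (((m - 1) * l : Nat) : Int)) := by
          intro hc; exact hfin (by exact_mod_cast hc)
        rw [if_neg hfinI]
        have := ih (d + 1) (r + 1) (by omega) (by omega) (by omega)
          (by
            rcases hmax with h0 | h0
            · left; omega
            · right; simpa [show d + 1 - (r + 1) - 1 = d - r - 1 by omega] using h0)
          (by
            intro j hj1 hj2
            rcases Nat.lt_or_ge j d with hlt | hge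
            · exact hstreak j (by omega) hlt
            · have : j = d := by omega
              rw [this]; exact he)
          (by
            intro s hs
            rcases Nat.lt_or_ge (s + (m - 1) * l) (d + 1) with hlt | hge
            · exact hnofind s (by omega)
            · have hse : s + (m - 1) * l = d + 1 := by omega
              rcases hmax with h0 | h0
              · omega
              · rw [pvGood, decide_eq_false_iff_not]
                intro hall
                have hj : d - r - 1 - s < (m - 1) * l := by omega
                have := hall (d - r - 1 - s) hj
                rw [show s + (d - r - 1 - s) = d - r - 1 by omega] at this
                rw [beq_eq_false_iff_ne] at h0
                exact h0 this)
        push_cast at this ⊢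
        exact this
    · rw [Bool.not_eq_true] at he
      rw [he, if_neg (by simp)]
      have := ih (d + 1) 0 (by omega) (by omega) (by omega)
        (by right; simpa using he)
        (by intro j hj1 hj2; omega)
        (by
          intro s hs
          rcases Nat.lt_or_ge (s + (m - 1) * l) (d + 1) with hlt | hge
          · exact hnofind s (by omega)
          · have hse : s + (m - 1) * l = d + 1 := by omega
            rw [pvGood, decide_eq_false_iff_not]
            intro hall
            have := hall ((m - 1) * l - 1) (by omega)
            rw [show s + ((m - 1) * l - 1) = d by omega] at this
            rw [beq_eq_false_iff_ne] at he
            exact he this)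
      push_cast at this ⊢
      exact this

theorem pvRunLoopB_eq_find (words : List String) (l m : Nat) (hl : 1 ≤ l) (hm : 2 ≤ m)
    (hn : m * l ≤ words.length) :
    pvRunLoopB words (l : Int) (((m - 1) * l : Nat) : Int)
        ((List.range (words.length - l)).map (fun i => pvW words i == pvW words (i + l))) 0 0 =
      ((List.range (words.length - m * l + 1)).find? (pvGood words l ((m - 1) * l))).map
        (fun s => PySem.Str.join " " ((words.drop s).take l)) := by
  have := pvRun_aux words l m hl hm hn (words.length - l) 0 0 (by omega) (by omega)
    (by
      have := Nat.mul_le_mul (show 1 ≤ m - 1 by omega) hl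
      omega)
    (Or.inl rfl)
    (by intro j h1 h2; omega)
    (by
      intro s hs
      exfalso
      have := Nat.mul_le_mul (show 1 ≤ m - 1 by omega) hl
      omega)
  rw [List.range_eq_range']
  simpa using this

theorem pvPerL (words : List String) (L mr : Int) (hL : 1 ≤ L)
    (hbound : L * mr ≤ (words.length : Int)) :
    pvStartLoopA words L mr (PySem.List.pyRange 0 ((words.length : Int) - L * mr + 1) 1) =
      (if (mr - 1) * L ≤ 0 then
        (if L * mr ≤ (words.length : Int) then
          some (PySem.Str.join " " (PySem.List.slice words none (some L)))
        else none)
      else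
        pvRunLoopB words L ((mr - 1) * L)
          ((words.zip (PySem.List.slice words (some L) none)).map (fun p => p.1 == p.2)) 0 0) := by
  rcases le_or_gt mr 1 with hmr1 | hmr2
  · -- mr ≤ 1 : first start succeeds immediately
    have hneed : (mr - 1) * L ≤ 0 := mul_nonpos_of_nonpos_of_nonneg (by omega) (by omega)
    rw [if_pos hneed, if_pos hbound]
    rw [PySem.List.pyRange_one_cons (by omega)]
    rw [pvStartLoopA]
    rw [if_pos (le_trans (by omega) (pvCountLoopA_le words _ L _ (0 + L) 1))]
    rw [show (0 : Int) + L = L from zero_add L]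
    rw [PySem.List.slice_zero_start]
  · -- mr ≥ 2 : both sides equal the same find?
    have hmr2' : 2 ≤ mr := by omega
    set l : Nat := L.toNat with hldef
    set m : Nat := mr.toNat with hmdef
    have hLl : L = (l : Int) := by omega
    have hmm : mr = (m : Int) := by omega
    have hl1 : 1 ≤ l := by omega
    have hm2 : 2 ≤ m := by omega
    have hml : m * l ≤ words.length := by
      have : ((m * l : Nat) : Int) ≤ (words.length : Int) := by
        push_cast
        rw [← hmm, ← hLl, mul_comm]
        exact hbound
      exact_mod_cast this
    have hln : l ≤ words.length := by
      have : 1 * l ≤ m * l := Nat.mul_le_mul_right l (by omega)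
      omega
    have hneed : ¬ ((mr - 1) * L ≤ 0) := by
      rw [hLl, hmm]
      have : (1 : Int) ≤ ((m : Int) - 1) * (l : Int) := by
        have h1 : (1 : Int) ≤ (m : Int) - 1 := by omega
        have h2 : (1 : Int) ≤ (l : Int) := by omega
        nlinarith
      omega
    rw [if_neg hneed]
    -- LHS
    have hrange : PySem.List.pyRange 0 ((words.length : Int) - L * mr + 1) 1 =
        (List.range (words.length - m * l + 1)).map Int.ofNat := by
      rw [PySem.List.pyRange_one]
      have harg : ((words.length : Int) - L * mr + 1 - 0).toNat = words.length - m * l + 1 := by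
        rw [hLl, hmm]
        have hprod : ((l : Int)) * ((m : Int)) = ((m * l : Nat) : Int) := by push_cast; ring
        rw [hprod]
        have hc : ((m * l : Nat) : Int) ≤ (words.length : Int) := by exact_mod_cast hml
        omega
      rw [harg]
      simp [Int.ofNat_eq_natCast]
    rw [hrange, hLl, hmm]
    rw [pvStartLoopA_eq_find words l m hl1 hm2 (List.range (words.length - m * l + 1))
      (by intro s hs; rw [List.mem_range] at hs; omega)]
    -- RHS
    rw [show PySem.List.slice words (some ((l : Nat) : Int)) none = words.drop l from
      PySem.List.slice_from_natCast words l]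
    rw [pvEqs_eq words l hln]
    rw [show ((m : Int) - 1) * (l : Int) = (((m - 1) * l : Nat) : Int) by
      push_cast [Nat.cast_sub (show 1 ≤ m by omega)]; ring]
    rw [pvRunLoopB_eq_find words l m hl1 hm2 hml]

-- outer loops agree given every reachable length is sound
theorem pvPhraseLoop_eq (words : List String) (mr : Int) :
    ∀ Ls : List Int, (∀ L ∈ Ls, 1 ≤ L ∧ L * mr ≤ (words.length : Int)) →
      pvPhraseLoopA words mr Ls = pvPhraseLoopB words mr Ls := by
  intro Ls
  induction Ls with
  | nil => intro _; rfl
  | cons L rest ih =>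
    intro h
    have hL := h L (by simp)
    have hrec := ih (fun L' hL' => h L' (by simp [hL']))
    simp only [pvPhraseLoopA, pvPhraseLoopB]
    rw [pvPerL words L mr hL.1 hL.2]
    by_cases hneed : (mr - 1) * L ≤ 0
    · simp only [if_pos hneed, if_pos hL.2]
    · simp only [if_neg hneed]
      cases hres : pvRunLoopB words L ((mr - 1) * L)
          ((words.zip (PySem.List.slice words (some L) none)).map (fun p => p.1 == p.2)) 0 0 with
      | none => simpa [hres] using hrec
      | some r => simp

-- ===== VERDICT (by name: the statement is the Claim_ definition above) =====
theorem has_repeated_phrase_spec : Claim_equal_has_repeated_phrase := by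
  intro text minL maxL mr _ hpre
  unfold Spec_has_repeated_phrase has_repeated_phrase has_repeated_phrase_alt
  set words := PySem.Str.split₀ (PySem.Str.lower text) with hw
  obtain ⟨hmr, hcase⟩ := hpre
  set upper := min (maxL + 1) (PySem.Int.floordiv ((words.length : Int)) mr + 1) with hu
  apply pvPhraseLoop_eq words mr
  intro L hL
  rw [PySem.List.mem_pyRange_one] at hL
  rcases hcase with h1 | h1
  · -- 1 ≤ min_phrase_len : every reachable L is ≥ 1 and L*mr ≤ n
    have hn : (0:Int) ≤ (words.length : Int) := by positivity
    refine ⟨by omega, ?_⟩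
    have hub : L ≤ PySem.Int.floordiv (words.length : Int) mr := by omega
    rcases lt_trichotomy mr 0 with hneg | hz | hpos
    · exfalso
      have hfl : PySem.Int.floordiv (words.length : Int) mr ≤ 0 := by
        have h1 := PySem.Int.floordiv_mul_add_mod (words.length : Int) mr
        have h2 := PySem.Int.mod_neg_bounds (a := (words.length : Int)) hneg
        by_contra hc
        have := mul_neg_of_pos_of_neg (show (0:Int) < PySem.Int.floordiv (words.length : Int) mr by omega) hneg
        omega
      omega
    · exact absurd hz hmr
    · exact (PySem.Int.le_floordiv_iff_mul_le hpos).mp hub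
  · -- upper ≤ minL: range empty, contradiction with hL
    exfalso; omega
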